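-- pv_equiv track=rewrite | github.com/Laidwin/Kings_League_France_Predictions | lib/methode_exhaustive.py | methode_exhaustive
-- ===== SOURCE A (Python) =====
-- from itertools import product
--
-- def methode_exhaustive(current_points: dict[str, int], remaining_matches: list[tuple[str, str]]) -> dict[str, list[int]]:
--     """
--     Simule les résultats des matchs restants en utilisant la méthode exhaustive.
--
--     Args:
--         current_points (dict[str, int]): Dictionnaire contenant les points actuels de chaque équipe.
--         remaining_matches (list[tuple[str, str]]): Liste des matchs restants à jouer, chaque match étant représenté par un tuple d'équipes.
--
--     Returns:
--         dict[str, list[int]]: Dictionnaire contenant le nombre de fois où chaque équipe a terminé à chaque position.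
--     """
--     # Définition des équipes et issues possibles d’un match
--     teams: list[str] = list(current_points.keys())
--     match_outcomes: list[tuple[int, int]] = [(3, 0), (2, 1), (1, 2), (0, 3)]
--
--     # Génération de toutes les combinaisons possibles de résultats
--     total_scenarios: int = len(match_outcomes) ** len(remaining_matches)
--     all_combinations: product[tuple[tuple[int, int], ...]] = product(match_outcomes, repeat=len(remaining_matches))
--
--     # Compteur de positions finales pour chaque équipe
--     position_counter: dict[str, list[int]] = {team: [0] * len(teams) for team in teams}
--
--     # Simulation des scénarios
--     outcome_set: tuple[tuple[int, int], ...]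
--     for outcome_set in all_combinations:
--         points: dict[str, int] = current_points.copy()
--         match: tuple[str, str]
--         outcome: tuple[int, int]
--         for match, outcome in zip(remaining_matches, outcome_set):
--             team1: str
--             team2: str
--             team1, team2 = match
--             pts1: int
--             pts2: int
--             pts1, pts2 = outcome
--             points[team1] += pts1
--             points[team2] += pts2
--
--         # Tri des équipes par points
--         sorted_teams: list[tuple[str, int]] = sorted(points.items(), key=lambda x: (-x[1], x[0]))
--         position: int
--         team: str
--         for position, (team, _) in enumerate(sorted_teams):
--             position_counter[team][position] += 1
--
--     return position_counter, total_scenarios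
-- ===== SOURCE B (Python) =====
-- def methode_exhaustive(current_points: dict[str, int], remaining_matches: list[tuple[str, str]]) -> dict[str, list[int]]:
--     """Recursive backtracking over the matches with one mutable working dict,
--     instead of materialising all itertools.product outcome tuples."""
--     teams = list(current_points.keys())
--     n = len(teams)
--     position_counter = {team: [0] * n for team in teams}
--     points = dict(current_points)  # one working copy; the caller's dict is untouched
--
--     def go(i: int) -> None:
--         if i == len(remaining_matches):
--             ranked = sorted(points.items(), key=lambda x: (-x[1], x[0]))
--             for position, (team, _) in enumerate(ranked):
--                 position_counter[team][position] += 1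
--             return
--         team1, team2 = remaining_matches[i]
--         for pts1, pts2 in ((3, 0), (2, 1), (1, 2), (0, 3)):
--             points[team1] += pts1
--             points[team2] += pts2
--             go(i + 1)
--             points[team1] -= pts1
--             points[team2] -= pts2
--
--     go(0)
--     return position_counter, 4 ** len(remaining_matches)
-- ===== Notes on version B (the rewrite author's own statement) =====
-- stated objective: alternative
-- what changed: Replaces the flat itertools.product enumeration of all outcome tuples with a recursive backtracking helper over the matches that mutates one working points dict in place and undoes each outcome after recursing.
import Mathlib
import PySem

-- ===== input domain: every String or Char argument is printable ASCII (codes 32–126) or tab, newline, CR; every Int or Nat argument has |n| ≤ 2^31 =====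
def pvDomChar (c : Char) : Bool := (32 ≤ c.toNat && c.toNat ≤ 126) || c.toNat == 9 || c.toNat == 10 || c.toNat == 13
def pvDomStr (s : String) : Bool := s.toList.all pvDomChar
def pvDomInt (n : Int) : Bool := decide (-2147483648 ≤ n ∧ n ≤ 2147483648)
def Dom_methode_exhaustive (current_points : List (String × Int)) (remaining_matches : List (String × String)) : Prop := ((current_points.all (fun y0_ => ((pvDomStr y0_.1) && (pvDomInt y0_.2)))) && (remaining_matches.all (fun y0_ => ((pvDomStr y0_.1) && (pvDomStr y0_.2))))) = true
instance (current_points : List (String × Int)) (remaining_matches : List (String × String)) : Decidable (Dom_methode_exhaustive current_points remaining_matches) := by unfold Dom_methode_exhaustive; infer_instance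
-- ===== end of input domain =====

-- B replaces the flat itertools.product enumeration with a recursive backtracking
-- helper over the matches (same outcome space, different decomposition); objective: alternative.

-- ===== PORT A =====
-- match_outcomes
def pvA_outcomes : List (Int × Int) := [(3, 0), (2, 1), (1, 2), (0, 3)]

-- itertools.product(match_outcomes, repeat=n), in CPython's order (last factor varies fastest)
def pvA_product : Nat → List (List (Int × Int))
  | 0 => [[]]
  | n + 1 => pvA_outcomes.flatMap (fun o => (pvA_product n).map (o :: ·))

-- points[team1] += pts1; points[team2] += pts2  (keys present under Pre_, so 'modify' with default 0 is exact there)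
def pvA_applyMatch (points : PySem.Dict String Int) (p : (String × String) × (Int × Int)) : PySem.Dict String Int :=
  (points.modify p.1.1 0 (· + p.2.1)).modify p.1.2 0 (· + p.2.2)

-- the per-scenario tally: sort points.items() by (-points, name), then bump position_counter[team][position]
def pvA_bump (counter : PySem.Dict String (List Int)) (points : PySem.Dict String Int) : PySem.Dict String (List Int) :=
  let sorted_teams := PySem.List.sorted2 points.items (fun x => -x.2) (fun x => x.1)
  (PySem.List.enumerate sorted_teams).foldl
    (fun c pe => c.modify pe.2.1 [] (fun l => l.set pe.1.toNat (l.getD pe.1.toNat 0 + 1))) counter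

def methode_exhaustive (current_points : List (String × Int)) (remaining_matches : List (String × String)) : (List (String × List Int)) × Int :=
  let d : PySem.Dict String Int := PySem.Dict.ofList current_points
  let teams : List String := d.keys
  let total_scenarios : Int := (pvA_outcomes.length : Int) ^ remaining_matches.length
  let position_counter : PySem.Dict String (List Int) :=
    teams.foldl (fun c team => c.insert team (List.replicate teams.length (0 : Int))) PySem.Dict.empty
  let all_combinations := pvA_product remaining_matches.length
  let final := all_combinations.foldl
    (fun c outcome_set => pvA_bump c ((remaining_matches.zip outcome_set).foldl pvA_applyMatch d)) position_counter
  (final.items, total_scenarios)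

-- ===== PORT B =====
-- the base case of go: sort the working points, bump each team's slot at its rank
def pvB_leaf (points : PySem.Dict String Int) (counter : PySem.Dict String (List Int)) : PySem.Dict String (List Int) :=
  let ranked := PySem.List.sorted2 points.items (fun x => -x.2) (fun x => x.1)
  (PySem.List.enumerate ranked).foldl
    (fun c pe => c.modify pe.2.1 [] (fun l => l.set pe.1.toNat (l.getD pe.1.toNat 0 + 1))) counter

-- go(i): apply each of the four outcomes to match i, recurse, undo — rendered functionally
-- by passing the working points (the undo restores exactly the points this call received)
def pvB_go (remaining : List (String × String)) (points : PySem.Dict String Int) (counter : PySem.Dict String (List Int)) : PySem.Dict String (List Int) :=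
  match remaining with
  | [] => pvB_leaf points counter
  | (team1, team2) :: rest =>
      [((3 : Int), (0 : Int)), (2, 1), (1, 2), (0, 3)].foldl
        (fun c o => pvB_go rest ((points.modify team1 0 (· + o.1)).modify team2 0 (· + o.2)) c) counter

def methode_exhaustive_alt (current_points : List (String × Int)) (remaining_matches : List (String × String)) : (List (String × List Int)) × Int :=
  let d : PySem.Dict String Int := PySem.Dict.ofList current_points
  let teams : List String := d.keys
  let position_counter : PySem.Dict String (List Int) :=
    teams.foldl (fun c team => c.insert team (List.replicate teams.length (0 : Int))) PySem.Dict.empty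
  ((pvB_go remaining_matches d position_counter).items, (4 : Int) ^ remaining_matches.length)

-- ===== PRECONDITION & SPEC =====
-- Pre_ excludes exactly the inputs on which A raises KeyError: some team named in
-- remaining_matches is not a key of current_points.
def Pre_methode_exhaustive (current_points : List (String × Int)) (remaining_matches : List (String × String)) : Prop :=
  remaining_matches.all (fun m => current_points.any (fun p => p.1 == m.1) && current_points.any (fun p => p.1 == m.2)) = true
instance (current_points : List (String × Int)) (remaining_matches : List (String × String)) : Decidable (Pre_methode_exhaustive current_points remaining_matches) := by unfold Pre_methode_exhaustive; infer_instance

def pvWitness_methode_exhaustive : (List (String × Int)) × (List (String × String)) :=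
  ([("A", 3), ("B", 0)], [("A", "B"), ("B", "A")])

def Spec_methode_exhaustive (current_points : List (String × Int)) (remaining_matches : List (String × String)) (out : (List (String × List Int)) × Int) : Prop := out = methode_exhaustive_alt current_points remaining_matches
instance (current_points : List (String × Int)) (remaining_matches : List (String × String)) (out : (List (String × List Int)) × Int) : Decidable (Spec_methode_exhaustive current_points remaining_matches out) := by unfold Spec_methode_exhaustive; infer_instance

-- ===== CLAIM (what is proved, stated in full; the proofs are below) =====
def Claim_equal_methode_exhaustive : Prop := ∀ (current_points : List (String × Int)) (remaining_matches : List (String × String)), Dom_methode_exhaustive current_points remaining_matches → Pre_methode_exhaustive current_points remaining_matches → Spec_methode_exhaustive current_points remaining_matches (methode_exhaustive current_points remaining_matches)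

-- ===== LEMMAS AND PROOFS =====

theorem pv_fold_product_eq_go (ms : List (String × String)) (points : PySem.Dict String Int)
    (counter : PySem.Dict String (List Int)) :
    (pvA_product ms.length).foldl
      (fun c outcome_set => pvA_bump c ((ms.zip outcome_set).foldl pvA_applyMatch points)) counter
    = pvB_go ms points counter := by
  induction ms generalizing points counter with
  | nil => rfl
  | cons m rest ih =>
      obtain ⟨team1, team2⟩ := m
      show (pvA_outcomes.flatMap fun o => (pvA_product rest.length).map (o :: ·)).foldl _ counter = _
      rw [List.foldl_flatMap]
      simp only [List.foldl_map, List.zip_cons_cons, List.foldl_cons]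
      show [((3:Int),(0:Int)),(2,1),(1,2),(0,3)].foldl _ counter = pvB_go _ points counter
      rw [pvB_go]
      exact PySem.List.foldl_congr_mem _ _ _ _ (fun c o _ => ih _ c)

theorem methode_exhaustive_spec : Claim_equal_methode_exhaustive := by
  intro current_points remaining_matches _ _
  show methode_exhaustive current_points remaining_matches = methode_exhaustive_alt current_points remaining_matches
  simp only [methode_exhaustive, methode_exhaustive_alt, pv_fold_product_eq_go]
  norm_num [pvA_outcomes]
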